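-- pv_equiv track=rewrite | github.com/yeongminChae/Python-Practice | 프로그래머스/1/42840. 모의고사/모의고사.py | li3_maker
-- ===== SOURCE A (Python) =====
-- def li3_maker(li) :
--     li3 = []
--     a = 0
--     for i, _ in enumerate(li) :
--         if a < 1 :
--             for _ in range(2) : li3.append(3)
--         else :
--             if a != 3 :
--                 for _ in range(2) : li3.append(a)
--         a += 1
--         if a > 5 : a = 0
--     return li3[:len(li)]
-- ===== SOURCE B (Python) =====
-- def li3_maker(li):
--     pattern = [3, 3, 1, 1, 2, 2, 4, 4, 5, 5]
--     return [pattern[i % 10] for i in range(len(li))]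
-- ===== Notes on version B (the rewrite author's own statement) =====
-- stated objective: simpler
-- what changed: Replaces A's 6-state counter loop with double appends, a skip at a==3 and an over-build-then-truncate by a direct modular index into a precomputed period-10 lookup table.
import Mathlib
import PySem

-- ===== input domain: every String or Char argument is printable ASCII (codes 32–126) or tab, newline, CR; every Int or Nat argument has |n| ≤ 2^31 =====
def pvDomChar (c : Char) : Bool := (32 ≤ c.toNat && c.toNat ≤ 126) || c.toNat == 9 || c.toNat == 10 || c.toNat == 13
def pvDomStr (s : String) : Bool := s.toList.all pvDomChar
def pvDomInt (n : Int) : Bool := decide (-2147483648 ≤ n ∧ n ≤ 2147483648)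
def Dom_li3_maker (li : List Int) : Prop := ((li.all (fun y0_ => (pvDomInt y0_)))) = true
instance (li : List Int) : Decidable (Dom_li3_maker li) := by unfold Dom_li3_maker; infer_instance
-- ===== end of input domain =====

-- B replaces A's 6-state counter loop (double appends, skip at a==3, over-build then truncate)
-- by a direct modular lookup into the precomputed period-10 pattern; objective: simpler.

-- ===== PORT A =====
-- the loop body of A (state = (li3, a)); the loop index i is unused by the body
def li3_step (s : List Int × Int) : List Int × Int :=
  let li3 := if s.2 < 1 then s.1 ++ [3, 3]
             else if s.2 ≠ 3 then s.1 ++ [s.2, s.2] else s.1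
  let a := s.2 + 1
  (li3, if a > 5 then 0 else a)

def li3_maker (li : List Int) : List Int :=
  let st := li.zipIdx.foldl (fun s _ => li3_step s) (([] : List Int), (0 : Int))
  PySem.List.slice st.1 none (some (li.length : Int))   -- li3[:len(li)]

-- ===== PORT B =====
def li3_pattern : List Int := [3, 3, 1, 1, 2, 2, 4, 4, 5, 5]

def li3_maker_alt (li : List Int) : List Int :=
  (PySem.List.pyRange 0 (li.length : Int) 1).map
    (fun i => (PySem.List.pyGet? li3_pattern (PySem.Int.mod i 10)).getD 0)
    -- pattern[i % 10]: the index is always in range, so pyGet? is never none (no IndexError)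

-- ===== PRECONDITION & SPEC =====
def Spec_li3_maker (li : List Int) (out : List Int) : Prop := out = li3_maker_alt li
instance (li : List Int) (out : List Int) : Decidable (Spec_li3_maker li out) := by unfold Spec_li3_maker; infer_instance

-- ===== CLAIM (what is proved, stated in full; the proofs are below) =====
def Claim_equal_li3_maker : Prop := ∀ (li : List Int), Dom_li3_maker li → Spec_li3_maker li (li3_maker li)

-- ===== LEMMAS AND PROOFS =====

-- the infinite period-10 pattern, as a function of the position
def patfn (m : Nat) : Int :=
  match m % 10 with
  | 0 => 3 | 1 => 3 | 2 => 1 | 3 => 1 | 4 => 2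
  | 5 => 2 | 6 => 4 | 7 => 4 | 8 => 5 | _ => 5

-- the pattern prefix of length m
def pref (m : Nat) : List Int := (List.range m).map patfn

-- number of elements A has appended within a partial period of r steps
def wfun (r : Nat) : Nat :=
  match r with
  | 0 => 0 | 1 => 2 | 2 => 4 | 3 => 6 | 4 => 6 | _ => 8

-- number of elements A has appended after k loop iterations
def cfun (k : Nat) : Nat := 10 * (k / 6) + wfun (k % 6)

lemma pref_add_two (m : Nat) : pref (m + 2) = pref m ++ [patfn m, patfn (m + 1)] := by
  simp [pref, List.range_succ]

lemma step_eq (k : Nat) :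
    li3_step (pref (cfun k), ((k % 6 : Nat) : Int))
      = (pref (cfun (k + 1)), (((k + 1) % 6 : Nat) : Int)) := by
  have h6 : k % 6 = 0 ∨ k % 6 = 1 ∨ k % 6 = 2 ∨ k % 6 = 3 ∨ k % 6 = 4 ∨ k % 6 = 5 := by omega
  obtain h | h | h | h | h | h := h6
  · -- k % 6 = 0: two elements appended
    have hc : cfun k = 10 * (k / 6) + 0 := by simp [cfun, h, wfun]
    have e1 : (k + 1) % 6 = 1 := by omega
    have e2 : (k + 1) / 6 = k / 6 := by omega
    have hm : cfun k % 10 = 0 := by rw [hc]; omega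
    have hm1 : (cfun k + 1) % 10 = 1 := by rw [hc]; omega
    have hcc : cfun (k + 1) = cfun k + 2 := by
      simp only [cfun, e1, e2, h, wfun]
    rw [hcc, pref_add_two]
    simp [li3_step, h, e1, patfn, hm, hm1]
  · -- k % 6 = 1: two elements appended
    have hc : cfun k = 10 * (k / 6) + 2 := by simp [cfun, h, wfun]
    have e1 : (k + 1) % 6 = 2 := by omega
    have e2 : (k + 1) / 6 = k / 6 := by omega
    have hm : cfun k % 10 = 2 := by rw [hc]; omega
    have hm1 : (cfun k + 1) % 10 = 3 := by rw [hc]; omega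
    have hcc : cfun (k + 1) = cfun k + 2 := by
      simp only [cfun, e1, e2, h, wfun]
    rw [hcc, pref_add_two]
    simp [li3_step, h, e1, patfn, hm, hm1]
  · -- k % 6 = 2: two elements appended
    have hc : cfun k = 10 * (k / 6) + 4 := by simp [cfun, h, wfun]
    have e1 : (k + 1) % 6 = 3 := by omega
    have e2 : (k + 1) / 6 = k / 6 := by omega
    have hm : cfun k % 10 = 4 := by rw [hc]; omega
    have hm1 : (cfun k + 1) % 10 = 5 := by rw [hc]; omega
    have hcc : cfun (k + 1) = cfun k + 2 := by
      simp only [cfun, e1, e2, h, wfun]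
    rw [hcc, pref_add_two]
    simp [li3_step, h, e1, patfn, hm, hm1]
  · -- k % 6 = 3: nothing appended
    have e1 : (k + 1) % 6 = 4 := by omega
    have hcc : cfun (k + 1) = cfun k := by
      have hc : cfun k = 10 * (k / 6) + 6 := by simp [cfun, h, wfun]
      have e2 : (k + 1) / 6 = k / 6 := by omega
      simp only [cfun, e1, e2, h, wfun]
    rw [hcc]
    simp [li3_step, h, e1]
  · -- k % 6 = 4: two elements appended
    have hc : cfun k = 10 * (k / 6) + 6 := by simp [cfun, h, wfun]
    have e1 : (k + 1) % 6 = 5 := by omega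
    have e2 : (k + 1) / 6 = k / 6 := by omega
    have hm : cfun k % 10 = 6 := by rw [hc]; omega
    have hm1 : (cfun k + 1) % 10 = 7 := by rw [hc]; omega
    have hcc : cfun (k + 1) = cfun k + 2 := by
      simp only [cfun, e1, e2, h, wfun]
    rw [hcc, pref_add_two]
    simp [li3_step, h, e1, patfn, hm, hm1]
  · -- k % 6 = 5: two elements appended
    have hc : cfun k = 10 * (k / 6) + 8 := by simp [cfun, h, wfun]
    have e1 : (k + 1) % 6 = 0 := by omega
    have e2 : (k + 1) / 6 = k / 6 + 1 := by omega
    have hm : cfun k % 10 = 8 := by rw [hc]; omega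
    have hm1 : (cfun k + 1) % 10 = 9 := by rw [hc]; omega
    have hcc : cfun (k + 1) = cfun k + 2 := by
      simp only [cfun, e1, e2, h, wfun]; omega
    rw [hcc, pref_add_two]
    simp [li3_step, h, e1, patfn, hm, hm1]

lemma loop_inv {β : Type} (l : List β) : ∀ (k : Nat),
    l.foldl (fun s _ => li3_step s) (pref (cfun k), ((k % 6 : Nat) : Int))
      = (pref (cfun (k + l.length)), (((k + l.length) % 6 : Nat) : Int)) := by
  induction l with
  | nil => intro k; simp
  | cons x xs ih =>
      intro k
      rw [List.foldl_cons, step_eq, ih (k + 1)]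
      have : k + 1 + xs.length = k + (x :: xs).length := by simp; omega
      rw [this]

lemma le_cfun (n : Nat) : n ≤ cfun n := by
  have h6 : n % 6 = 0 ∨ n % 6 = 1 ∨ n % 6 = 2 ∨ n % 6 = 3 ∨ n % 6 = 4 ∨ n % 6 = 5 := by omega
  obtain h | h | h | h | h | h := h6 <;>
    · have : cfun n = 10 * (n / 6) + wfun (n % 6) := rfl
      rw [h] at this; simp only [wfun] at this; omega

lemma alt_elem (i : Nat) :
    (PySem.List.pyGet? li3_pattern (PySem.Int.mod (i : Int) 10)).getD 0 = patfn i := by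
  have hm : PySem.Int.mod (i : Int) 10 = ((i % 10 : Nat) : Int) := by
    exact_mod_cast PySem.Int.mod_natCast i 10
  rw [hm]
  have h10 : i % 10 = 0 ∨ i % 10 = 1 ∨ i % 10 = 2 ∨ i % 10 = 3 ∨ i % 10 = 4 ∨
      i % 10 = 5 ∨ i % 10 = 6 ∨ i % 10 = 7 ∨ i % 10 = 8 ∨ i % 10 = 9 := by omega
  obtain h | h | h | h | h | h | h | h | h | h := h10 <;>
    simp [h, patfn, li3_pattern, PySem.List.pyGet?, PySem.List.pyIdx?]

lemma alt_eq_pref (li : List Int) : li3_maker_alt li = pref li.length := by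
  unfold li3_maker_alt pref
  rw [PySem.List.pyRange_one]
  simp only [sub_zero, Int.toNat_natCast, List.map_map]
  apply List.map_congr_left
  intro i _
  simpa using alt_elem i

-- ===== VERDICT (by name: the statement is the Claim_ definition above) =====
theorem li3_maker_spec : Claim_equal_li3_maker := by
  intro li _
  unfold Spec_li3_maker li3_maker
  have h0 := loop_inv (β := Int × Nat) li.zipIdx 0
  have hpref0 : pref (cfun 0) = ([] : List Int) := by simp [pref, cfun, wfun]
  rw [hpref0] at h0
  simp only [Nat.zero_mod, Nat.cast_zero, Nat.zero_add, List.length_zipIdx] at h0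
  rw [h0]
  rw [alt_eq_pref]
  rw [PySem.List.slice_to_natCast]
  unfold pref
  rw [← List.map_take, List.take_range, Nat.min_eq_left (le_cfun _)]
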